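-- pv_equiv track=rewrite | github.com/wkazmierczak/Introduction_to_Computer_Science_AGH_UST_course | BIT/zajecia_3/cw_1.py | czytrzyjedynki
-- ===== SOURCE A (Python) =====
-- def czytrzyjedynki(bin):
--     counter = 0
--     while bin > 0:
--         if bin % 2 == 1:
--             counter += 1
--         bin //= 2
--     if counter == 3:
--         return True
--     else:
--         return False
-- ===== SOURCE B (Python) =====
-- def czytrzyjedynki(bin):
--     if bin <= 0:
--         return False
--     x = bin & (bin - 1)      # clear lowest set bit: at least 1 bit set
--     if x == 0:
--         return False         # exactly 1 bit
--     y = x & (x - 1)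
--     if y == 0:
--         return False         # exactly 2 bits
--     return y & (y - 1) == 0  # exactly 3 bits iff nothing remains after third clear
-- ===== Notes on version B (the rewrite author's own statement) =====
-- stated objective: alternative
-- what changed: B is loop-free: it clears the lowest set bit three times with x & (x-1) and decides via zero tests, instead of A's while loop that tests bin % 2 and halves per bit position.
import Mathlib
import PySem

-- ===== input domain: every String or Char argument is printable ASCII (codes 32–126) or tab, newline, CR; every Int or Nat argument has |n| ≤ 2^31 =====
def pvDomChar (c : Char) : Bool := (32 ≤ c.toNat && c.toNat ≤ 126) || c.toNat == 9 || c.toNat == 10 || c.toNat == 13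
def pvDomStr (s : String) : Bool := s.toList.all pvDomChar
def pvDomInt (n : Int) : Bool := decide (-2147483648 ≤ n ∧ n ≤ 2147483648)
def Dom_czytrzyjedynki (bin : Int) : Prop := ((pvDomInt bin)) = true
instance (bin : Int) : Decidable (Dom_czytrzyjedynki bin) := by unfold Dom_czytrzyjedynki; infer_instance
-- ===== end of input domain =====

-- B is loop-free: it clears the lowest set bit three times (x & (x-1)) with zero tests,
-- instead of A's while loop testing bin % 2 and halving; values agree on all Ints.
-- A's loop is ported with a fuel parameter (bin.toNat + 1, always sufficient) purely to
-- make the recursion structural; it changes no computed value.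

-- ===== PORT A =====
-- while bin > 0: if bin % 2 == 1: counter += 1; bin //= 2
def czyLoopA : Nat → Int → Int → Int
  | 0, _, counter => counter
  | fuel + 1, bin, counter =>
    if bin > 0 then
      czyLoopA fuel (PySem.Int.floordiv bin 2)
        (if PySem.Int.mod bin 2 = 1 then counter + 1 else counter)
    else counter

def czytrzyjedynki (bin : Int) : Bool :=
  let counter := czyLoopA (bin.toNat + 1) bin 0
  if counter = 3 then true else false

-- ===== PORT B =====
def czytrzyjedynki_alt (bin : Int) : Bool :=
  if bin ≤ 0 then false
  else
    let x := PySem.Int.band bin (bin - 1)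
    if x = 0 then false
    else
      let y := PySem.Int.band x (x - 1)
      if y = 0 then false
      else decide (PySem.Int.band y (y - 1) = 0)

-- ===== PRECONDITION & SPEC =====
def Spec_czytrzyjedynki (bin : Int) (out : Bool) : Prop := out = czytrzyjedynki_alt bin
instance (bin : Int) (out : Bool) : Decidable (Spec_czytrzyjedynki bin out) := by unfold Spec_czytrzyjedynki; infer_instance

-- ===== CLAIM (what is proved, stated in full; the proofs are below) =====
def Claim_equal_czytrzyjedynki : Prop := ∀ (bin : Int), Dom_czytrzyjedynki bin → Spec_czytrzyjedynki bin (czytrzyjedynki bin)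

-- ===== LEMMAS AND PROOFS =====

theorem land_even_step (k : Nat) : (2 * k) &&& (2 * (k - 1) + 1) = 2 * (k &&& (k - 1)) := by
  have e1 : 2 * k = Nat.bit false k := by simp [Nat.bit_val]
  have e2 : 2 * (k - 1) + 1 = Nat.bit true (k - 1) := by simp [Nat.bit_val]
  rw [e1, e2, Nat.land_bit]
  simp [Nat.bit_val]

theorem land_odd_step (k : Nat) : (2 * k + 1) &&& (2 * k) = 2 * k := by
  have e1 : 2 * k + 1 = Nat.bit true k := by simp [Nat.bit_val]
  have e2 : 2 * k = Nat.bit false k := by simp [Nat.bit_val]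
  rw [e1, e2, Nat.land_bit]
  simp [Nat.bit_val]

/-- population count by halving -/
def pvPop (n : Nat) : Nat :=
  if n = 0 then 0 else pvPop (n / 2) + n % 2

theorem pvPop_zero : pvPop 0 = 0 := by simp [pvPop]

theorem pvPop_pos (n : Nat) (h : 0 < n) : pvPop n = pvPop (n / 2) + n % 2 := by
  rw [pvPop]; simp [Nat.pos_iff_ne_zero.mp h]

/-- Kernighan step: clearing the lowest set bit drops the popcount by one. -/
theorem pvPop_land (n : Nat) (h : 0 < n) : pvPop (n &&& (n - 1)) + 1 = pvPop n := by
  induction n using Nat.strong_induction_on with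
  | _ n ih =>
    rcases Nat.even_or_odd n with ⟨k, hk⟩ | ⟨k, hk⟩
    · have hkpos : 0 < k := by omega
      have hn2 : n = 2 * k := by omega
      have hland : n &&& (n - 1) = 2 * (k &&& (k - 1)) := by
        have h3 : n - 1 = 2 * (k - 1) + 1 := by omega
        rw [h3, hn2]; exact land_even_step k
      have hih := ih k (by omega) hkpos
      have hpopn : pvPop n = pvPop k := by
        rw [pvPop_pos n h]
        have h1 : n / 2 = k := by omega
        have h2 : n % 2 = 0 := by omega
        rw [h1, h2]; omega
      rw [hland, hpopn]
      by_cases hz : k &&& (k - 1) = 0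
      · rw [hz] at hih ⊢
        simpa [pvPop_zero] using hih
      · rw [pvPop_pos (2 * (k &&& (k - 1))) (by omega)]
        have h1 : 2 * (k &&& (k - 1)) / 2 = k &&& (k - 1) := by omega
        have h2 : 2 * (k &&& (k - 1)) % 2 = 0 := by omega
        rw [h1, h2]
        omega
    · have hland : n &&& (n - 1) = 2 * k := by
        have h2 : n - 1 = 2 * k := by omega
        have h1 : n = 2 * k + 1 := by omega
        rw [h2, h1]; exact land_odd_step k
      rw [hland, pvPop_pos n h]
      have hd : n / 2 = k := by omega
      have hm : n % 2 = 1 := by omega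
      rw [hd, hm]
      by_cases hz : k = 0
      · subst hz; simp [pvPop_zero]
      · rw [pvPop_pos (2 * k) (by omega)]
        have h1 : 2 * k / 2 = k := by omega
        have h2 : 2 * k % 2 = 0 := by omega
        rw [h1, h2]

theorem pvPop_eq_zero (n : Nat) : pvPop n = 0 ↔ n = 0 := by
  constructor
  · intro h
    by_contra hne
    have := pvPop_land n (by omega)
    omega
  · intro h; subst h; exact pvPop_zero

theorem czyLoopA_eq (fuel : Nat) : ∀ (n : Nat) (c : Int), n < fuel →
    czyLoopA fuel (n : Int) c = c + (pvPop n : Int) := by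
  induction fuel with
  | zero => intro n c h; omega
  | succ fuel ih =>
    intro n c h
    by_cases hp : (n : Int) > 0
    · have hn : 0 < n := by exact_mod_cast hp
      rw [czyLoopA, if_pos hp]
      have hfd : PySem.Int.floordiv (n : Int) 2 = ((n / 2 : Nat) : Int) := by
        exact_mod_cast PySem.Int.floordiv_natCast n 2
      have hmd : PySem.Int.mod (n : Int) 2 = ((n % 2 : Nat) : Int) := by
        exact_mod_cast PySem.Int.mod_natCast n 2
      rw [hfd, hmd, ih (n / 2) _ (by omega)]
      rw [pvPop_pos n hn]
      by_cases hodd : n % 2 = 1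
      · rw [if_pos (by exact_mod_cast hodd)]
        push_cast; omega
      · have h0 : n % 2 = 0 := by omega
        rw [if_neg (by omega), h0]
        push_cast; omega
    · rw [czyLoopA, if_neg hp]
      have : n = 0 := by omega
      subst this; simp [pvPop_zero]

/-- B decides pvPop = 3 on positive inputs. -/
theorem alt_eq_pop (n : Nat) (h : 0 < n) :
    czytrzyjedynki_alt (n : Int) = decide (pvPop n = 3) := by
  unfold czytrzyjedynki_alt
  rw [if_neg (by omega : ¬ (n : Int) ≤ 0)]
  have hsub1 : (n : Int) - 1 = ((n - 1 : Nat) : Int) := by omega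
  rw [hsub1, PySem.Int.band_natCast]
  have hp1 := pvPop_land n h
  by_cases hx : n &&& (n - 1) = 0
  · rw [if_pos (by exact_mod_cast hx)]
    have : pvPop n = 1 := by
      have := (pvPop_eq_zero (n &&& (n - 1))).mpr hx
      omega
    simp [this]
  · have hxpos : 0 < n &&& (n - 1) := by omega
    rw [if_neg (by exact_mod_cast hx)]
    set x := n &&& (n - 1) with hxdef
    have hsub2 : (x : Int) - 1 = ((x - 1 : Nat) : Int) := by omega
    rw [hsub2, PySem.Int.band_natCast]
    have hp2 := pvPop_land x hxpos
    by_cases hy : x &&& (x - 1) = 0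
    · rw [if_pos (by exact_mod_cast hy)]
      have : pvPop n = 2 := by
        have := (pvPop_eq_zero (x &&& (x - 1))).mpr hy
        omega
      simp [this]
    · have hypos : 0 < x &&& (x - 1) := by omega
      rw [if_neg (by exact_mod_cast hy)]
      set y := x &&& (x - 1) with hydef
      have hsub3 : (y : Int) - 1 = ((y - 1 : Nat) : Int) := by omega
      rw [hsub3, PySem.Int.band_natCast]
      have hp3 := pvPop_land y hypos
      by_cases hz : y &&& (y - 1) = 0
      · have : pvPop n = 3 := by
          have := (pvPop_eq_zero (y &&& (y - 1))).mpr hz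
          omega
        simp [this, hz]
      · have : pvPop n ≠ 3 := by
          have h4 : pvPop (y &&& (y - 1)) ≠ 0 := fun hh => hz ((pvPop_eq_zero _).mp hh)
          omega
        simp [this]
        exact_mod_cast hz

-- ===== VERDICT (by name: the statement is the Claim_ definition above) =====
theorem czytrzyjedynki_spec : Claim_equal_czytrzyjedynki := by
  intro bin _
  unfold Spec_czytrzyjedynki czytrzyjedynki
  by_cases h : bin > 0
  · have hn : bin = ((bin.toNat : Nat) : Int) := by omega
    have hc : czyLoopA (bin.toNat + 1) bin 0 = 0 + (pvPop bin.toNat : Int) := by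
      have := czyLoopA_eq (bin.toNat + 1) bin.toNat 0 (by omega)
      rwa [← hn] at this
    have ha : czytrzyjedynki_alt bin = decide (pvPop bin.toNat = 3) := by
      rw [hn]; exact alt_eq_pop bin.toNat (by omega)
    rw [hc, ha]
    by_cases hp : pvPop bin.toNat = 3
    · simp [hp]
    · have hne : ((pvPop bin.toNat : Int)) ≠ 3 := by
        push_cast; omega
      simp [hp, hne]
  · rw [czyLoopA, if_neg h]
    have ha : czytrzyjedynki_alt bin = false := by
      unfold czytrzyjedynki_alt
      rw [if_pos (by omega : bin ≤ 0)]
    rw [ha]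
    simp
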